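-- pv_equiv track=rewrite | github.com/stat-thon/coding-test-example | BOJ/문자열_맞힌-사람-상위-10문제.py | whole_score
-- ===== SOURCE A (Python) =====
-- from collections import deque
--
-- def cal_score(rep_num):
--     score = 0
--     for num in range(rep_num + 1):
--         score += num
--     return score
--
-- def whole_score(OX):
--     dq = deque([ox for ox in OX + 'X'])
--     result = 0
--     rep_O = 0
--
--     while dq:
--         q = dq.popleft()
--
--         if q == 'O':
--             rep_O += 1
--
--         else:
--             result += cal_score(rep_O)
--             rep_O = 0
--
--     return result
-- ===== SOURCE B (Python) =====
-- from itertools import groupby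
--
-- def whole_score(OX):
--     return sum(n * (n + 1) // 2
--                for n in (len(list(g)) for k, g in groupby(OX) if k == 'O'))
-- ===== Notes on version B (the rewrite author's own statement) =====
-- stated objective: idiomatic
-- what changed: Replaces A's deque/per-character state machine with its inner triangular-sum loop by grouping the string into maximal runs (itertools.groupby) and summing the closed-form triangular number n*(n+1)//2 of each 'O'-run length.
import Mathlib
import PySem

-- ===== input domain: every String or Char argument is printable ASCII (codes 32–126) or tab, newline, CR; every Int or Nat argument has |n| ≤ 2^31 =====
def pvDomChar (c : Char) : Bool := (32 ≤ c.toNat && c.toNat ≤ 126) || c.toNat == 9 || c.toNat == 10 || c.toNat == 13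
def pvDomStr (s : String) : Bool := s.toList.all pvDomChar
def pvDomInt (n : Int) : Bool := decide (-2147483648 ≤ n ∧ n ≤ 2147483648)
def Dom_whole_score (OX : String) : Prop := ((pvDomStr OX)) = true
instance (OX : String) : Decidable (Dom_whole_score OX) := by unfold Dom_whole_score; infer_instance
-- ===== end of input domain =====

-- B groups the string into maximal runs and sums the closed-form triangular number of each
-- 'O'-run length, instead of A's per-character deque loop with an inner summation loop.

-- ===== PORT A =====
def cal_score (rep_num : Int) : Int :=
  (PySem.List.pyRange 0 (rep_num + 1) 1).foldl (fun score num => score + num) 0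

def whole_score (OX : String) : Int :=
  ((OX ++ "X").toList.foldl
    (fun (st : Int × Int) q =>
      if q = 'O' then (st.1, st.2 + 1) else (st.1 + cal_score st.2, 0))
    (0, 0)).1

-- ===== PORT B =====
-- transliteration of itertools.groupby: list of (key, group length), in order
def pyGroupLens : List Char → List (Char × Nat)
  | [] => []
  | c :: cs =>
    match pyGroupLens cs with
    | [] => [(c, 1)]
    | (k, n) :: rest => if c = k then (c, n + 1) :: rest else (c, 1) :: (k, n) :: rest

def whole_score_alt (OX : String) : Int :=
  (((pyGroupLens OX.toList).filter (fun p => p.1 == 'O')).map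
      (fun p => ((p.2 * (p.2 + 1) / 2 : Nat) : Int))).sum

-- ===== PRECONDITION & SPEC =====
def Spec_whole_score (OX : String) (out : Int) : Prop := out = whole_score_alt OX
instance (OX : String) (out : Int) : Decidable (Spec_whole_score OX out) := by unfold Spec_whole_score; infer_instance

-- ===== CLAIM (what is proved, stated in full; the proofs are below) =====
def Claim_equal_whole_score : Prop := ∀ (OX : String), Dom_whole_score OX → Spec_whole_score OX (whole_score OX)

-- ===== LEMMAS AND PROOFS =====

def oSum (l : List Char) : Int :=
  (((pyGroupLens l).filter (fun p => p.1 == 'O')).map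
      (fun p => ((p.2 * (p.2 + 1) / 2 : Nat) : Int))).sum

def stepA (st : Int × Int) (q : Char) : Int × Int :=
  if q = 'O' then (st.1, st.2 + 1) else (st.1 + cal_score st.2, 0)

lemma cal_score_nat (r : ℕ) : cal_score (r : Int) = ((r * (r + 1) / 2 : ℕ) : Int) := by
  induction r with
  | zero =>
      decide
  | succ r ih =>
      have hsplit := PySem.List.pyRange_one_succ_right (a := 0) (b := (r : Int) + 1)
        (by positivity)
      have heven : (r * (r + 1)) % 2 = 0 := Nat.even_iff.mp (Nat.even_mul_succ_self r)
      have hmul : (r + 1) * (r + 1 + 1) = r * (r + 1) + 2 * (r + 1) := by ring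
      have hcast : ((r + 1 : ℕ) : Int) = (r : Int) + 1 := by push_cast; ring
      simp only [cal_score, hcast, hsplit, List.foldl_append] at *
      simp only [List.foldl_cons, List.foldl_nil]
      rw [ih]
      have : (r + 1) * (r + 1 + 1) / 2 = r * (r + 1) / 2 + (r + 1) := by omega
      rw [this]; push_cast; ring

lemma groupLens_head (c : Char) (l : List Char) :
    ∃ n rest, pyGroupLens (c :: l) = (c, n) :: rest := by
  cases h : pyGroupLens l with
  | nil => exact ⟨1, [], by simp [pyGroupLens, h]⟩
  | cons p rest =>
      obtain ⟨k, n⟩ := p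
      by_cases hck : c = k
      · exact ⟨n + 1, rest, by simp [pyGroupLens, h, hck]⟩
      · exact ⟨1, (k, n) :: rest, by simp [pyGroupLens, h, hck]⟩

lemma pyGroupLens_cons (c : Char) (l : List Char) :
    pyGroupLens (c :: l) = match pyGroupLens l with
      | [] => [(c, 1)]
      | (k, n) :: rest => if c = k then (c, n + 1) :: rest else (c, 1) :: (k, n) :: rest := rfl

def SepHead (l : List Char) : Prop := l = [] ∨ ∃ c cs, l = c :: cs ∧ c ≠ 'O'

lemma groupLens_replicate (r : ℕ) (l : List Char) (h : SepHead l) :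
    pyGroupLens (List.replicate r 'O' ++ l) =
      (if r = 0 then [] else [('O', r)]) ++ pyGroupLens l := by
  induction r with
  | zero => simp
  | succ r ih =>
      rw [List.replicate_succ, List.cons_append]
      by_cases hr : r = 0
      · subst hr
        simp only [List.replicate, List.nil_append] at *
        rcases h with rfl | ⟨c, cs, rfl, hc⟩
        · simp [pyGroupLens]
        · obtain ⟨n, rest, hgl⟩ := groupLens_head c cs
          have hne : ¬ ('O' = c) := fun he => hc he.symm
          rw [pyGroupLens_cons, hgl]
          simp [hne]
      · rw [pyGroupLens_cons, ih]
        simp [hr]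

lemma oSum_cons_sep (c : Char) (l : List Char) (hc : c ≠ 'O') :
    oSum (c :: l) = oSum l := by
  unfold oSum
  cases h : pyGroupLens l with
  | nil => simp [pyGroupLens, h, hc]
  | cons p rest =>
      obtain ⟨k, n⟩ := p
      by_cases hck : c = k
      · simp [pyGroupLens, h, hck, hck ▸ hc]
      · simp [pyGroupLens, h, hck, hc]

lemma oSum_replicate (r : ℕ) (l : List Char) (h : SepHead l) :
    oSum (List.replicate r 'O' ++ l) = ((r * (r + 1) / 2 : ℕ) : Int) + oSum l := by
  unfold oSum
  rw [groupLens_replicate r l h]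
  by_cases hr : r = 0
  · subst hr; simp
  · simp [hr]

lemma main_loop (cs : List Char) (r : ℕ) (res : Int) :
    ((cs ++ ['X']).foldl stepA (res, (r : Int))).1 =
      res + oSum (List.replicate r 'O' ++ cs) := by
  induction cs generalizing r res with
  | nil =>
      have h1 : oSum (List.replicate r 'O' ++ ([] : List Char)) =
          ((r * (r + 1) / 2 : ℕ) : Int) + oSum [] :=
        oSum_replicate r [] (Or.inl rfl)
      simp only [List.nil_append, List.foldl_cons, List.foldl_nil, stepA]
      rw [h1]
      simp [oSum, pyGroupLens, cal_score_nat r]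
  | cons c cs ih =>
      by_cases hc : c = 'O'
      · subst hc
        have hcast : (r : Int) + 1 = ((r + 1 : ℕ) : Int) := by push_cast; ring
        simp only [List.cons_append, List.foldl_cons, stepA]
        rw [if_pos trivial, hcast, ih (r + 1) res]
        congr 2
        rw [List.replicate_succ', List.append_assoc]
        simp
      · simp only [List.cons_append, List.foldl_cons, stepA, if_neg hc]
        have h0 := ih 0 (res + cal_score (r : Int))
        rw [Nat.cast_zero] at h0
        rw [h0]
        rw [oSum_replicate r (c :: cs) (Or.inr ⟨c, cs, rfl, hc⟩), oSum_cons_sep c cs hc]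
        rw [cal_score_nat r]
        simp [List.replicate]
        ring

-- ===== VERDICT (by name: the statement is the Claim_ definition above) =====
theorem whole_score_spec : Claim_equal_whole_score := by
  intro OX _
  show whole_score OX = whole_score_alt OX
  have hl : (OX ++ "X").toList = OX.toList ++ ['X'] := by
    simp
  have := main_loop OX.toList 0 0
  simp only [List.replicate, List.nil_append, Nat.cast_zero, zero_add] at this
  unfold whole_score
  rw [hl]
  show ((OX.toList ++ ['X']).foldl stepA (0, 0)).1 = _
  rw [this]
  rfl
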